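-- pv_equiv track=rewrite | github.com/tisan-das/Ntyx | countCovered.py | totalCovered
-- ===== SOURCE A (Python) =====
-- def totalCovered(jump,lcsaj,lines):
-- 	boolLCSAJ = []
-- 	for i in range(0,len(lcsaj)):
-- 		boolLCSAJ.append(False)
-- 		for k in range(0,len(lcsaj)):
-- 			tupl = lcsaj[i]
-- 			j = 0
-- 			while j<len(lines)-2 and lines[j]!=tupl[0]:
-- 				j += 1
-- 			if j==len(lines):
-- 				break
-- 			while j<len(lines)-1 and lines[j]!=tupl[1]:
-- 				j += 1
-- 			if j==len(lines)-1:
-- 				break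
-- 			if lines[j+1]!=tupl[2]:
-- 				break
-- 			boolLCSAJ[i] = True
-- 	return boolLCSAJ
-- ===== SOURCE B (Python) =====
-- def totalCovered(jump, lcsaj, lines):
--     # Index every line value by its (sorted) list of positions once, then answer
--     # each triple with two lookups in the index instead of rescanning lines.
--     n = len(lines)
--     pos = {}
--     for i, v in enumerate(lines):
--         pos.setdefault(v, []).append(i)
--
--     def first_in(v, lo, hi):
--         # least position of v in [lo, hi), or None
--         for p in pos.get(v, ()):
--             if p >= lo:
--                 return p if p < hi else None
--         return None
--
--     result = []
--     for a, b, c in lcsaj: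
--         j = first_in(a, 0, n - 2)
--         if j is not None:
--             j = first_in(b, j, n - 1)
--         result.append(j is not None and lines[j + 1] == c)
--     return result
-- ===== Notes on version B (the rewrite author's own statement) =====
-- stated objective: faster
-- what changed: B builds a positions index (value -> ordered list of indices) over lines once and answers each triple with two lookups in that index, instead of A's repetition of a full sequential scan of lines for every k in a redundant inner loop over all of lcsaj.
-- intended difference: On inputs where some triple's first component never occurs before the last two lines while the last two lines equal the triple's second and third components, A accidentally resumes its search at index len(lines)-2 and returns True for that triple; B returns False, the intended meaning of 'the triple appears as a consecutive subsequence'. — e.g. on totalCovered(0, [(0, 1, 2)], [1, 2]): A returns [true], B returns [false]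
import Mathlib
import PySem

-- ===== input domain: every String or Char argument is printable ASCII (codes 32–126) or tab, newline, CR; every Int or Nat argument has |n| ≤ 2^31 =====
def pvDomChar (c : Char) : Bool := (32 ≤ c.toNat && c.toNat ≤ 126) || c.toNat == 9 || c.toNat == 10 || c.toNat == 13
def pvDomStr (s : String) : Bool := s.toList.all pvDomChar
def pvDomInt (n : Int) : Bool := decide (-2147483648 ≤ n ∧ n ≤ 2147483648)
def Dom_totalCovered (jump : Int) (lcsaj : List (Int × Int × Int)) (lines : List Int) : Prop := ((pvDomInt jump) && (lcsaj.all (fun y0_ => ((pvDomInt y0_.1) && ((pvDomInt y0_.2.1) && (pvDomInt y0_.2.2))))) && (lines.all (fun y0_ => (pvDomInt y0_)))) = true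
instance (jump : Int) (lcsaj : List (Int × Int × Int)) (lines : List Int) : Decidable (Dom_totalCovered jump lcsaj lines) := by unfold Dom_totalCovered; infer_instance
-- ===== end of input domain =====

-- B indexes each line value by its positions once and answers every triple from that
-- index, dropping A's redundant repetition of the check for every k: faster.

-- ===== PORT A =====
-- the Python 'while j<bound and lines[j]!=t: j += 1' loops (indices stay in range, so
-- lines[j] is List.getD; the bound is Python int arithmetic, possibly negative)
def scanWhileA (lines : List Int) (bound : Int) (t : Int) (j : Nat) : Nat :=
  if (j : Int) < bound ∧ lines.getD j 0 ≠ t then scanWhileA lines bound t (j + 1) else j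
termination_by (bound - (j : Int)).toNat
decreasing_by omega

-- the 'for k in range(0,len(lcsaj))' loop around the membership test, with its breaks
-- (a break returns the current value of boolLCSAJ[i], carried here as acc)
def innerA (lines : List Int) (tupl : Int × Int × Int) : Nat → Bool → Bool
  | 0, acc => acc
  | Nat.succ k, acc =>
    let n : Int := lines.length
    let j := scanWhileA lines (n - 2) tupl.1 0
    if (j : Int) = n then acc
    else
      let j2 := scanWhileA lines (n - 1) tupl.2.1 j
      if (j2 : Int) = n - 1 then acc
      else if lines.getD (j2 + 1) 0 ≠ tupl.2.2 then acc
      else innerA lines tupl k true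

def totalCovered (jump : Int) (lcsaj : List (Int × Int × Int)) (lines : List Int) : List Bool :=
  lcsaj.map (fun tupl => innerA lines tupl lcsaj.length false)

-- ===== PORT B =====
-- 'for i, v in enumerate(lines): pos.setdefault(v, []).append(i)'
-- (setdefault-then-append is exactly Dict.modify with default [])
def buildPos (lines : List Int) : PySem.Dict Int (List Int) :=
  (PySem.List.enumerate lines 0).foldl (fun d p => d.modify p.2 [] (· ++ [p.1])) PySem.Dict.empty

-- 'for p in pos.get(v, ()): if p >= lo: return p if p < hi else None;  return None'
def firstIn (pos : PySem.Dict Int (List Int)) (v lo hi : Int) : Option Int :=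
  match (pos.getD v []).find? (fun p => decide (lo ≤ p)) with
  | some p => if p < hi then some p else none
  | none => none

def totalCovered_alt (jump : Int) (lcsaj : List (Int × Int × Int)) (lines : List Int) : List Bool :=
  let n : Int := (lines.length : Int)
  let pos := buildPos lines
  lcsaj.map (fun t =>
    match firstIn pos t.1 0 (n - 2) with
    | none => false
    | some j0 =>
      match firstIn pos t.2.1 j0 (n - 1) with
      | none => false
      | some j => PySem.List.pyGetD lines (j + 1) 0 == t.2.2)

-- ===== PRECONDITION & SPEC =====
-- When a triple's first component never occurs before the last two lines, A accidentally
-- resumes its search from index len(lines)-2 and reports the triple covered whenever the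
-- last two lines equal the triple's SECOND and THIRD components, ignoring the first;
-- B reports such a triple uncovered, which is the intended meaning of coverage.
def D_totalCovered (jump : Int) (lcsaj : List (Int × Int × Int)) (lines : List Int) : Prop :=
  2 ≤ lines.length ∧ ∃ t ∈ lcsaj,
    t.1 ∉ lines.take (lines.length - 2) ∧
    lines.getD (lines.length - 2) 0 = t.2.1 ∧ lines.getD (lines.length - 1) 0 = t.2.2
instance (jump : Int) (lcsaj : List (Int × Int × Int)) (lines : List Int) : Decidable (D_totalCovered jump lcsaj lines) := by unfold D_totalCovered; infer_instance

def Spec_totalCovered (jump : Int) (lcsaj : List (Int × Int × Int)) (lines : List Int) (out : List Bool) : Prop := ¬ D_totalCovered jump lcsaj lines → out = totalCovered_alt jump lcsaj lines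
instance (jump : Int) (lcsaj : List (Int × Int × Int)) (lines : List Int) (out : List Bool) : Decidable (Spec_totalCovered jump lcsaj lines out) := by unfold Spec_totalCovered; infer_instance

def pvDiffWitness_totalCovered : Int × (List (Int × Int × Int)) × List Int := (0, [(0, 1, 2)], [1, 2])
def pvDiffWitnessOut_totalCovered : (List Bool) × (List Bool) := ([true], [false])

-- ===== CLAIM (what is proved, stated in full; the proofs are below) =====
def Claim_unchanged_totalCovered : Prop := ∀ (jump : Int) (lcsaj : List (Int × Int × Int)) (lines : List Int), Dom_totalCovered jump lcsaj lines → Spec_totalCovered jump lcsaj lines (totalCovered jump lcsaj lines)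
def Claim_changed_totalCovered : Prop := Dom_totalCovered (pvDiffWitness_totalCovered.1) (pvDiffWitness_totalCovered.2.1) (pvDiffWitness_totalCovered.2.2) ∧ D_totalCovered (pvDiffWitness_totalCovered.1) (pvDiffWitness_totalCovered.2.1) (pvDiffWitness_totalCovered.2.2) ∧ totalCovered (pvDiffWitness_totalCovered.1) (pvDiffWitness_totalCovered.2.1) (pvDiffWitness_totalCovered.2.2) = pvDiffWitnessOut_totalCovered.1 ∧ totalCovered_alt (pvDiffWitness_totalCovered.1) (pvDiffWitness_totalCovered.2.1) (pvDiffWitness_totalCovered.2.2) = pvDiffWitnessOut_totalCovered.2 ∧ pvDiffWitnessOut_totalCovered.1 ≠ pvDiffWitnessOut_totalCovered.2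
def Claim_exact_totalCovered : Prop := ∀ (jump : Int) (lcsaj : List (Int × Int × Int)) (lines : List Int), Dom_totalCovered jump lcsaj lines → D_totalCovered jump lcsaj lines → totalCovered jump lcsaj lines ≠ totalCovered_alt jump lcsaj lines

-- ===== LEMMAS AND PROOFS =====

-- A's while-scan, viewed as a first-match search with default max bound j
theorem scanWhileA_eq (lines : List Int) (t : Int) (bound : Int) (j : Nat) :
    (scanWhileA lines bound t j : Int)
      = ((PySem.List.pyRange j bound 1).find? (fun i => lines.getD i.toNat 0 == t)).getD
          (max bound j) := by
  fun_induction scanWhileA lines bound t j with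
  | case1 j h ih =>
    rw [PySem.List.pyRange_one_cons (by omega : (j : Int) < bound),
      List.find?_cons_of_neg (by simp [Int.toNat_natCast]; exact h.2)]
    rw [ih]
    congr 1
    push_cast
    omega
  | case2 j h =>
    by_cases hb : (j : Int) < bound
    · rw [PySem.List.pyRange_one_cons hb,
        List.find?_cons_of_pos (by
          simp [Int.toNat_natCast]
          by_contra hne
          exact h ⟨hb, hne⟩)]
      simp
    · rw [show PySem.List.pyRange j bound 1 = [] from by
        simp [PySem.List.pyRange_one]
        omega]
      simp
      omega

theorem innerA_true (lines : List Int) (tupl : Int × Int × Int) :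
    ∀ k, innerA lines tupl k true = true := by
  intro k
  induction k with
  | zero => rfl
  | succ k ih =>
    simp only [innerA]
    split_ifs <;> simp [ih]

-- the positions index: pos[v] is the increasing list of indices where lines equals v
theorem buildPos_getD (lines : List Int) (v : Int) :
    (buildPos lines).getD v []
      = (PySem.List.pyRange 0 (lines.length : Int) 1).filter
          (fun j => PySem.List.pyGetD lines j 0 == v) := by
  unfold buildPos
  rw [show (PySem.List.enumerate lines 0).foldl (fun d p => d.modify p.2 [] (· ++ [p.1])) PySem.Dict.empty
      = ((PySem.List.enumerate lines 0).map Prod.swap).foldl (fun d p => d.modify p.1 [] (· ++ [p.2])) PySem.Dict.empty from by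
    rw [List.foldl_map]; rfl]
  rw [PySem.Dict.getD_foldl_modify_append]
  rw [PySem.List.enumerate_eq_map_pyRange (d := 0)]
  simp [List.map_map, List.filter_map, Function.comp_def]

-- find? respects pointwise-equal predicates on the members
theorem find?_congr_mem (l : List Int) (p q : Int → Bool) (h : ∀ x ∈ l, p x = q x) :
    l.find? p = l.find? q := by
  induction l with
  | nil => rfl
  | cons a l ih =>
    simp only [List.find?_cons, h a (List.mem_cons_self)]
    split <;> [rfl; exact ih fun x hx => h x (List.mem_cons_of_mem a hx)]

-- B's index lookup = the first matching index in [lo, hi)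
theorem firstIn_eq (lines : List Int) (v lo hi : Int) (h0 : 0 ≤ lo) (hlh : lo ≤ hi)
    (hhn : hi ≤ (lines.length : Int)) :
    firstIn (buildPos lines) v lo hi
      = (PySem.List.pyRange lo hi 1).find? (fun i => lines.getD i.toNat 0 == v) := by
  unfold firstIn
  rw [buildPos_getD, List.find?_filter]
  rw [PySem.List.pyRange_one_append 0 lo (lines.length : Int) h0 (by omega),
      List.find?_append,
      PySem.List.pyRange_one_append lo hi (lines.length : Int) hlh hhn,
      List.find?_append]
  rw [show (PySem.List.pyRange 0 lo 1).find?
        (fun a => decide ((PySem.List.pyGetD lines a 0 == v) = true ∧ decide (lo ≤ a) = true)) = none from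
    List.find?_eq_none.2 (fun x hx => by
      have := (PySem.List.mem_pyRange_one.1 hx).2
      simp
      omega)]
  rw [show (PySem.List.pyRange lo hi 1).find?
        (fun a => decide ((PySem.List.pyGetD lines a 0 == v) = true ∧ decide (lo ≤ a) = true))
      = (PySem.List.pyRange lo hi 1).find? (fun i => lines.getD i.toNat 0 == v) from
    find?_congr_mem _ _ _ (fun x hx => by
      have hx' := PySem.List.mem_pyRange_one.1 hx
      have hx0 : 0 ≤ x := by omega
      rw [show x = ((x.toNat : Nat) : Int) from by omega, PySem.List.pyGetD_natCast]
      simp [hx'.1, show max x 0 = x from by omega, Bool.beq_eq_decide_eq])]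
  cases hmid : (PySem.List.pyRange lo hi 1).find? (fun i => lines.getD i.toNat 0 == v) with
  | some p =>
    have hp := PySem.List.mem_pyRange_one.1 (List.mem_of_find?_eq_some hmid)
    simp only [Option.none_or, Option.some_or]
    rw [if_pos (by omega)]
  | none =>
    simp only [Option.none_or]
    cases htail : (PySem.List.pyRange hi (lines.length : Int) 1).find?
        (fun a => decide ((PySem.List.pyGetD lines a 0 == v) = true ∧ decide (lo ≤ a) = true)) with
    | none => rfl
    | some p =>
      have hp := PySem.List.mem_pyRange_one.1 (List.mem_of_find?_eq_some htail)
      simp only []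
      rw [if_neg (by omega)]

-- when the window is empty the lookup finds nothing
theorem firstIn_none (lines : List Int) (v lo hi : Int) (h : hi ≤ 0) :
    firstIn (buildPos lines) v lo hi = none := by
  unfold firstIn
  cases hf : ((buildPos lines).getD v []).find? (fun p => decide (lo ≤ p)) with
  | none => rfl
  | some p =>
    have hm := List.mem_of_find?_eq_some hf
    rw [buildPos_getD] at hm
    have : 0 ≤ p := by
      have := List.mem_of_mem_filter hm
      exact (PySem.List.mem_pyRange_one.1 this).1
    simp only []
    rw [if_neg (by omega)]


-- a vanished first search means the value does not occur in the window
theorem notin_take_iff (lines : List Int) (v : Int) (m : Nat) (hm : m ≤ lines.length) :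
    ((PySem.List.pyRange 0 (m : Int) 1).find? (fun i => lines.getD i.toNat 0 == v) = none)
      ↔ v ∉ lines.take m := by
  rw [List.find?_eq_none]
  constructor
  · intro h hv
    obtain ⟨i, hi, hgi⟩ := List.mem_iff_getElem.1 hv
    have him : i < m := by simp at hi; omega
    have hmem : ((i : Nat) : Int) ∈ PySem.List.pyRange 0 (m : Int) 1 :=
      PySem.List.mem_pyRange_one.2 ⟨by positivity, by exact_mod_cast him⟩
    have hni := h _ hmem
    simp [Int.toNat_natCast] at hni
    apply hni
    rw [List.getElem?_eq_getElem (by omega : i < lines.length)]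
    have : lines[i] = v := (List.getElem_take (xs := lines)).symm.trans hgi
    simp [this]
  · intro hnv x hx
    have hx' := PySem.List.mem_pyRange_one.1 hx
    have hxl : x.toNat < m := by omega
    simp
    rw [List.getElem?_eq_getElem (by omega : x.toNat < lines.length)]
    intro hEq
    apply hnv
    rw [show v = lines[x.toNat] from by simpa using hEq.symm,
      ← List.getElem_take (xs := lines) (j := m) (h := by simp; omega)]
    exact List.getElem_mem _

-- the per-triple agreement: outside the misreported corner, one membership check
-- equals A's (k+1)-fold repetition of it
theorem perTriple (lines : List Int) (t : Int × Int × Int) (k : Nat)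
    (h : ¬ (2 ≤ lines.length ∧ t.1 ∉ lines.take (lines.length - 2) ∧
            lines.getD (lines.length - 2) 0 = t.2.1 ∧ lines.getD (lines.length - 1) 0 = t.2.2)) :
    innerA lines t (k + 1) false
      = (match firstIn (buildPos lines) t.1 0 ((lines.length : Int) - 2) with
         | none => false
         | some j0 =>
           match firstIn (buildPos lines) t.2.1 j0 ((lines.length : Int) - 1) with
           | none => false
           | some j => PySem.List.pyGetD lines (j + 1) 0 == t.2.2) := by
  by_cases hn1 : lines.length ≤ 1
  · rw [firstIn_none lines t.1 0 ((lines.length : Int) - 2) (by omega)]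
    simp only [innerA]
    have h1 : scanWhileA lines ((lines.length : Int) - 2) t.1 0 = 0 := by
      rw [scanWhileA, if_neg (by push_cast; omega)]
    rw [h1]
    rcases Nat.le_one_iff_eq_zero_or_eq_one.1 hn1 with h0 | h0
    · rw [if_pos (by simp [h0])]
    · rw [if_neg (by rw [h0]; simp)]
      have h2 : scanWhileA lines ((lines.length : Int) - 1) t.2.1 0 = 0 := by
        rw [scanWhileA, if_neg (by push_cast; omega)]
      rw [h2, if_pos (by simp [h0])]
  · have hn : 2 ≤ lines.length := by omega
    have hn2 : (2 : Int) ≤ (lines.length : Int) := by exact_mod_cast hn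
    set n : Int := (lines.length : Int) with hnd
    simp only [innerA]
    rw [firstIn_eq lines t.1 0 (n - 2) le_rfl (by omega) (by omega)]
    have hs1 := scanWhileA_eq lines t.1 (n - 2) 0
    rw [show ((0 : Nat) : Int) = 0 from rfl,
      show max (n - 2) 0 = n - 2 from by omega] at hs1
    set jN := scanWhileA lines (n - 2) t.1 0 with hjN
    cases hG1 : (PySem.List.pyRange 0 (n - 2) 1).find? (fun i => lines.getD i.toNat 0 == t.1) with
    | some j0 =>
      rw [hG1] at hs1
      simp only [Option.getD_some] at hs1
      obtain ⟨hj0l, hj0r⟩ := PySem.List.mem_pyRange_one.1 (List.mem_of_find?_eq_some hG1)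
      rw [if_neg (by omega)]
      show _ = (match firstIn (buildPos lines) t.2.1 j0 (n - 1) with
         | none => false
         | some j => PySem.List.pyGetD lines (j + 1) 0 == t.2.2)
      rw [firstIn_eq lines t.2.1 j0 (n - 1) (by omega) (by omega) (by omega)]
      have hs2 := scanWhileA_eq lines t.2.1 (n - 1) jN
      rw [hs1, show max (n - 1) j0 = n - 1 from by omega] at hs2
      set j2N := scanWhileA lines (n - 1) t.2.1 jN with hj2N
      cases hG2 : (PySem.List.pyRange j0 (n - 1) 1).find? (fun i => lines.getD i.toNat 0 == t.2.1) with
      | some j2 =>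
        rw [hG2] at hs2
        simp only [Option.getD_some] at hs2
        obtain ⟨hj2l, hj2r⟩ := PySem.List.mem_pyRange_one.1 (List.mem_of_find?_eq_some hG2)
        rw [if_neg (by omega)]
        have hpg : PySem.List.pyGetD lines (j2 + 1) 0 = lines.getD (j2N + 1) 0 := by
          rw [show j2 + 1 = (((j2N + 1 : Nat)) : Int) from by push_cast; omega,
            PySem.List.pyGetD_natCast]
        by_cases h3 : lines.getD (j2N + 1) 0 = t.2.2
        · rw [if_neg (by simpa using h3)]
          have h3' : lines[j2N + 1]?.getD 0 = t.2.2 := by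
            rw [← List.getD_eq_getElem?_getD]; exact h3
          simp [innerA_true, hpg, h3']
        · rw [if_pos (by simpa using h3)]
          have h3' : ¬ lines[j2N + 1]?.getD 0 = t.2.2 := by
            rw [← List.getD_eq_getElem?_getD]; exact h3
          simp [hpg, h3']
      | none =>
        rw [hG2] at hs2
        simp only [Option.getD_none] at hs2
        rw [if_pos hs2]
    | none =>
      rw [hG1] at hs1
      simp only [Option.getD_none] at hs1
      rw [if_neg (by omega)]
      have hs2 := scanWhileA_eq lines t.2.1 (n - 1) jN
      rw [hs1, show max (n - 1) (n - 2) = n - 1 from by omega,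
        show PySem.List.pyRange (n - 2) (n - 1) 1 = [n - 2] from by
          rw [show n - 1 = (n - 2) + 1 from by ring]
          exact PySem.List.pyRange_one_singleton _] at hs2
      set j2N := scanWhileA lines (n - 1) t.2.1 jN with hj2N
      have htn : (n - 2).toNat = lines.length - 2 := by omega
      have hnin : t.1 ∉ lines.take (lines.length - 2) := by
        refine (notin_take_iff lines t.1 (lines.length - 2) (by omega)).1 ?_
        rw [show ((lines.length - 2 : Nat) : Int) = n - 2 from by omega]
        exact hG1
      have hdisj : lines.getD (lines.length - 2) 0 ≠ t.2.1 ∨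
          lines.getD (lines.length - 1) 0 ≠ t.2.2 := by
        by_contra hc
        push_neg at hc
        exact h ⟨hn, hnin, hc.1, hc.2⟩
      by_cases he1 : lines.getD (lines.length - 2) 0 = t.2.1
      · have he1' : lines[lines.length - 2]?.getD 0 = t.2.1 := by
          rw [← List.getD_eq_getElem?_getD]; exact he1
        rw [List.find?_cons_of_pos (by simp [htn, he1'])] at hs2
        simp only [Option.getD_some] at hs2
        rw [if_neg (by omega)]
        have hj2N' : j2N = lines.length - 2 := by omega
        have he2 : lines.getD (lines.length - 1) 0 ≠ t.2.2 := by
          rcases hdisj with h' | h'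
          · exact absurd he1 h'
          · exact h'
        rw [if_pos (by rw [hj2N', show lines.length - 2 + 1 = lines.length - 1 from by omega]; exact he2)]
      · have he1' : ¬ lines[lines.length - 2]?.getD 0 = t.2.1 := by
          rw [← List.getD_eq_getElem?_getD]; exact he1
        rw [List.find?_cons_of_neg (by simp [htn, he1']), List.find?_nil] at hs2
        simp only [Option.getD_none] at hs2
        rw [if_pos hs2]

-- inside the corner the repetition reports true while the index reports false
theorem perTripleBad (lines : List Int) (t : Int × Int × Int) (k : Nat)
    (h2 : 2 ≤ lines.length) (hnin : t.1 ∉ lines.take (lines.length - 2))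
    (he1 : lines.getD (lines.length - 2) 0 = t.2.1)
    (he2 : lines.getD (lines.length - 1) 0 = t.2.2) :
    innerA lines t (k + 1) false = true
      ∧ (match firstIn (buildPos lines) t.1 0 ((lines.length : Int) - 2) with
         | none => false
         | some j0 =>
           match firstIn (buildPos lines) t.2.1 j0 ((lines.length : Int) - 1) with
           | none => false
           | some j => PySem.List.pyGetD lines (j + 1) 0 == t.2.2) = false := by
  have hn2 : (2 : Int) ≤ (lines.length : Int) := by exact_mod_cast h2
  set n : Int := (lines.length : Int) with hnd
  have hG1 : (PySem.List.pyRange 0 (n - 2) 1).find? (fun i => lines.getD i.toNat 0 == t.1)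
      = none := by
    have := (notin_take_iff lines t.1 (lines.length - 2) (by omega)).2 hnin
    rwa [show ((lines.length - 2 : Nat) : Int) = n - 2 from by omega] at this
  constructor
  · simp only [innerA]
    have hs1 := scanWhileA_eq lines t.1 (n - 2) 0
    rw [show ((0 : Nat) : Int) = 0 from rfl,
      show max (n - 2) 0 = n - 2 from by omega, hG1] at hs1
    simp only [Option.getD_none] at hs1
    set jN := scanWhileA lines (n - 2) t.1 0 with hjN
    rw [if_neg (by omega)]
    have hs2 := scanWhileA_eq lines t.2.1 (n - 1) jN
    rw [hs1, show max (n - 1) (n - 2) = n - 1 from by omega,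
      show PySem.List.pyRange (n - 2) (n - 1) 1 = [n - 2] from by
        rw [show n - 1 = (n - 2) + 1 from by ring]
        exact PySem.List.pyRange_one_singleton _] at hs2
    have htn : (n - 2).toNat = lines.length - 2 := by omega
    have he1' : lines[lines.length - 2]?.getD 0 = t.2.1 := by
      rw [← List.getD_eq_getElem?_getD]; exact he1
    rw [List.find?_cons_of_pos (by simp [htn, he1'])] at hs2
    simp only [Option.getD_some] at hs2
    set j2N := scanWhileA lines (n - 1) t.2.1 jN with hj2N
    rw [if_neg (by omega)]
    have hj2N' : j2N = lines.length - 2 := by omega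
    rw [if_neg (by rw [hj2N', show lines.length - 2 + 1 = lines.length - 1 from by omega]; simpa using he2)]
    exact innerA_true lines t k
  · rw [firstIn_eq lines t.1 0 (n - 2) le_rfl (by omega) (by omega), hG1]

-- ===== VERDICT (by name: the statement is the Claim_ definition above) =====
theorem totalCovered_spec : Claim_unchanged_totalCovered := by
  intro jump lcsaj lines _ hD
  show totalCovered jump lcsaj lines = totalCovered_alt jump lcsaj lines
  cases lcsaj with
  | nil => rfl
  | cons a l =>
    simp only [totalCovered, totalCovered_alt, List.length_cons]
    refine List.map_congr_left ?_
    intro t ht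
    exact perTriple lines t l.length (fun hb => hD ⟨hb.1, t, ht, hb.2⟩)

theorem totalCovered_changed : Claim_changed_totalCovered := by
  unfold Claim_changed_totalCovered
  refine ⟨by decide, by decide, ?_, by decide, by decide⟩
  show totalCovered 0 [(0, 1, 2)] [1, 2] = [true]
  simp [totalCovered, innerA, scanWhileA]

theorem totalCovered_tight : Claim_exact_totalCovered := by
  intro jump lcsaj lines _ hD heq
  obtain ⟨h2, t, ht, hnin, he1, he2⟩ := hD
  simp only [totalCovered, totalCovered_alt] at heq
  rw [List.map_inj_left] at heq
  have hft := heq t ht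
  obtain ⟨k, hk⟩ : ∃ k, lcsaj.length = k + 1 := by
    cases lcsaj with
    | nil => simp at ht
    | cons a l => exact ⟨l.length, rfl⟩
  rw [hk] at hft
  obtain ⟨hA, hB⟩ := perTripleBad lines t k h2 hnin he1 he2
  rw [hA] at hft
  rw [← hft] at hB
  simp at hB
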